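-- pv_equiv track=rewrite | github.com/P0it/Examply | backend/app/pipeline/adapter_engine.py | _extract_choices
-- ===== SOURCE A (Python) =====
-- from typing import List, Dict, Any, Optional, Tuple
--
-- def _extract_choices(block: str, adapter: Dict[str, Any]) -> Tuple[List[str], List[str]]:
--     """Extract choices from the block."""
--     choice_markers = adapter.get('choice_markers', [])
--     lines = [line.strip() for line in block.split('\n') if line.strip()]
--     choices = []
--     choice_lines = []
--
--     for marker_set in choice_markers:
--         found_choices = []
--         found_lines = []
--
--         for line in lines:
--             line_stripped = line.strip()
--             for marker in marker_set:
--                 if line_stripped.startswith(marker):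
--                     choice_text = line_stripped[len(marker):].strip()
--                     # Only add if choice text is meaningful (not just a marker)
--                     if choice_text and len(choice_text) > 1:
--                         found_choices.append(choice_text)
--                         found_lines.append(line)
--                     break  # Found marker, no need to check other markers for this line
--
--         # Use the marker set that found the most choices (and at least 2)
--         if len(found_choices) >= 2 and len(found_choices) > len(choices):
--             choices = found_choices
--             choice_lines = found_lines
--
--     return choices, choice_lines
-- ===== SOURCE B (Python) =====
-- from typing import List, Dict, Any, Tuple
--
--
-- def _feed(entry, line):
--     """Feed one line into one marker set's accumulator (first matching marker wins)."""
--     marker_set, found_choices, found_lines = entry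
--     line_stripped = line.strip()
--     for marker in marker_set:
--         if line_stripped.startswith(marker):
--             choice_text = line_stripped[len(marker):].strip()
--             if choice_text and len(choice_text) > 1:
--                 return (marker_set, found_choices + [choice_text], found_lines + [line])
--             return entry
--     return entry
--
--
-- def _extract_choices(block: str, adapter: Dict[str, Any]) -> Tuple[List[str], List[str]]:
--     """Extract choices from the block."""
--     marker_sets = adapter.get('choice_markers', [])
--     lines = [line.strip() for line in block.split('\n') if line.strip()]
--     # ONE pass over the lines, feeding each line to every marker set's accumulator
--     # simultaneously (line-major), instead of rescanning all lines once per marker set.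
--     acc = [(ms, [], []) for ms in marker_sets]
--     for line in lines:
--         acc = [_feed(entry, line) for entry in acc]
--     choices, choice_lines = [], []
--     for _, found_choices, found_lines in acc:
--         if len(found_choices) >= 2 and len(found_choices) > len(choices):
--             choices, choice_lines = found_choices, found_lines
--     return choices, choice_lines
-- ===== Notes on version B (the rewrite author's own statement) =====
-- stated objective: alternative
-- what changed: Loop inversion: B makes a single line-major pass over the lines, feeding each line simultaneously into one accumulator per marker set (a list of (marker_set, choices, lines) entries updated functionally), instead of A's set-major rescans of all lines once per marker set; the >=2/best selection is then a separate pass over the accumulators.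
import Mathlib
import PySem

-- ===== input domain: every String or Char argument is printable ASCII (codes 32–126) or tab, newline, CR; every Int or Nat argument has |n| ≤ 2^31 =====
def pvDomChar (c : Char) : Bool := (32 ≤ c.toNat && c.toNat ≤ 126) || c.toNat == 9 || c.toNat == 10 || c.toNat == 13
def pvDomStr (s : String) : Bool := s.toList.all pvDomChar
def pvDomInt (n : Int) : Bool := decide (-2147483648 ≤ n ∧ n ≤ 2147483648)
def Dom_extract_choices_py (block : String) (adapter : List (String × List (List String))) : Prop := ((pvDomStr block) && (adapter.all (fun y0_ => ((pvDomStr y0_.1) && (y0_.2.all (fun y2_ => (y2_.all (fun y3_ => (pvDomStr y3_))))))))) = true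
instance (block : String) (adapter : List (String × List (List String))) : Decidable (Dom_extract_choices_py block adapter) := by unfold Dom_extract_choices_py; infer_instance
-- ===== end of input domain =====

-- B inverts the loops: one line-major pass feeding every marker set's accumulator at once,
-- instead of A's set-major rescans of the lines; same cost, different traversal (objective: alternative).

-- ===== PORT A =====
def extract_choices_py (block : String) (adapter : List (String × List (List String))) : List String × List String :=
  let choice_markers := PySem.Dict.getD ⟨adapter⟩ "choice_markers" []
  let lines := (((PySem.Str.split? block "\n").getD []).filter (fun line => PySem.Str.strip line != "")).map PySem.Str.strip
  choice_markers.foldl (fun best marker_set =>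
    let found := lines.foldl (fun found line =>
      let line_stripped := PySem.Str.strip line
      match marker_set.find? (fun marker => PySem.Str.startswith line_stripped marker) with
      | some marker =>
        let choice_text := PySem.Str.strip (PySem.Str.slice line_stripped (some (PySem.Str.len marker)) none)
        if choice_text ≠ "" ∧ PySem.Str.len choice_text > 1 then (found.1 ++ [choice_text], found.2 ++ [line]) else found
      | none => found) ([], [])
    if found.1.length ≥ 2 ∧ found.1.length > best.1.length then found else best) ([], [])

-- ===== PORT B =====
-- Source B's `_feed`: one line into one marker set's accumulator (first matching marker wins)
def pvFeed (entry : List String × List String × List String) (line : String) :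
    List String × List String × List String :=
  let line_stripped := PySem.Str.strip line
  match entry.1.find? (fun marker => PySem.Str.startswith line_stripped marker) with
  | some marker =>
    let choice_text := PySem.Str.strip (PySem.Str.slice line_stripped (some (PySem.Str.len marker)) none)
    if choice_text ≠ "" ∧ PySem.Str.len choice_text > 1 then
      (entry.1, entry.2.1 ++ [choice_text], entry.2.2 ++ [line])
    else entry
  | none => entry

def extract_choices_py_alt (block : String) (adapter : List (String × List (List String))) : List String × List String :=
  let marker_sets := PySem.Dict.getD ⟨adapter⟩ "choice_markers" []
  let lines := (((PySem.Str.split? block "\n").getD []).filter (fun line => PySem.Str.strip line != "")).map PySem.Str.strip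
  let acc := lines.foldl (fun acc line => acc.map (fun e => pvFeed e line))
      (marker_sets.map (fun ms => (ms, ([] : List String), ([] : List String))))
  acc.foldl (fun best e =>
    if e.2.1.length ≥ 2 ∧ e.2.1.length > best.1.length then (e.2.1, e.2.2) else best) ([], [])

-- ===== PRECONDITION & SPEC =====
def Spec_extract_choices_py (block : String) (adapter : List (String × List (List String))) (out : List String × List String) : Prop := out = extract_choices_py_alt block adapter
instance (block : String) (adapter : List (String × List (List String))) (out : List String × List String) : Decidable (Spec_extract_choices_py block adapter out) := by unfold Spec_extract_choices_py; infer_instance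

-- ===== CLAIM (what is proved, stated in full; the proofs are below) =====
def Claim_equal_extract_choices_py : Prop := ∀ (block : String) (adapter : List (String × List (List String))), Dom_extract_choices_py block adapter → Spec_extract_choices_py block adapter (extract_choices_py block adapter)

-- ===== LEMMAS AND PROOFS =====

-- A's inner per-line step, for a fixed marker set
def pvStepLine (marker_set : List String) (found : List String × List String) (line : String) :
    List String × List String :=
  let line_stripped := PySem.Str.strip line
  match marker_set.find? (fun marker => PySem.Str.startswith line_stripped marker) with
  | some marker =>
    let choice_text := PySem.Str.strip (PySem.Str.slice line_stripped (some (PySem.Str.len marker)) none)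
    if choice_text ≠ "" ∧ PySem.Str.len choice_text > 1 then (found.1 ++ [choice_text], found.2 ++ [line]) else found
  | none => found

-- pvFeed keeps its marker set and advances the accumulator by A's per-line step
theorem pvFeed_eq (ms : List String) (p : List String × List String) (line : String) :
    pvFeed (ms, p) line = (ms, pvStepLine ms p line) := by
  simp only [pvFeed, pvStepLine]
  cases ms.find? (fun marker => PySem.Str.startswith (PySem.Str.strip line) marker) with
  | none => rfl
  | some marker => dsimp only; split <;> rfl

-- the loop exchange: one line-major pass over all accumulators = per-set folds over the lines
theorem pvExchange (lines : List String) (a0 : List (List String × List String × List String)) :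
    lines.foldl (fun acc line => acc.map (fun e => pvFeed e line)) a0
      = a0.map (fun e => lines.foldl pvFeed e) := by
  induction lines generalizing a0 with
  | nil => simp
  | cons l ls ih =>
    simp only [List.foldl_cons, ih, List.map_map]
    rfl

theorem pvFold_feed (lines : List String) (ms : List String) (p : List String × List String) :
    lines.foldl pvFeed (ms, p) = (ms, lines.foldl (pvStepLine ms) p) := by
  induction lines generalizing p with
  | nil => rfl
  | cons l ls ih => simp only [List.foldl_cons, pvFeed_eq, ih]

theorem pvMain (lines : List String) (sets : List (List String)) :
    sets.foldl (fun best marker_set =>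
        let found := lines.foldl (pvStepLine marker_set) ([], [])
        if found.1.length ≥ 2 ∧ found.1.length > best.1.length then found else best) ([], [])
      = (lines.foldl (fun acc line => acc.map (fun e => pvFeed e line))
          (sets.map (fun ms => (ms, ([] : List String), ([] : List String))))).foldl
          (fun best e => if e.2.1.length ≥ 2 ∧ e.2.1.length > best.1.length then (e.2.1, e.2.2) else best) ([], []) := by
  rw [pvExchange, List.map_map, List.foldl_map]
  simp only [Function.comp, pvFold_feed]

-- ===== VERDICT (by name: the statement is the Claim_ definition above) =====
theorem extract_choices_py_spec : Claim_equal_extract_choices_py := by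
  intro block adapter _
  unfold Spec_extract_choices_py
  exact pvMain
    ((((PySem.Str.split? block "\n").getD []).filter (fun line => PySem.Str.strip line != "")).map PySem.Str.strip)
    (PySem.Dict.getD ⟨adapter⟩ "choice_markers" [])
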